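-- pv_equiv track=rewrite | github.com/limijd/ai-doctool2 | aidoc_strip.py | _cleanup_whitespace
-- ===== SOURCE A (Python) =====
-- def _cleanup_whitespace(content: str, max_empty: int = 2, cleanup_log: list = None) -> str:
--     """连续空行超过 max_empty 个时裁剪。"""
--     lines = content.split('\n')
--     result: list[str] = []
--     empty_count = 0
--
--     for line_num, line in enumerate(lines, 1):
--         if line.strip() == '':
--             empty_count += 1
--             if empty_count <= max_empty:
--                 result.append(line)
--             elif cleanup_log is not None:
--                 cleanup_log.append((line_num, "(empty line)", "excess_empty_line"))
--         else:
--             empty_count = 0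
--             result.append(line)
--
--     return '\n'.join(result)
-- ===== SOURCE B (Python) =====
-- def _cleanup_whitespace(content: str, max_empty: int = 2, cleanup_log: list = None) -> str:
--     """Run-based rewrite: scan maximal runs of equal emptiness with two pointers,
--     keep each empty run's first max_empty lines, log the surplus."""
--     lines = content.split('\n')
--     result = []
--     i, n = 0, len(lines)
--     while i < n:
--         empty = lines[i].strip() == ''
--         j = i
--         while j < n and (lines[j].strip() == '') == empty:
--             j += 1
--         run = lines[i:j]
--         if empty:
--             keep = max(max_empty, 0)
--             result.extend(run[:keep])
--             if cleanup_log is not None: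
--                 for off in range(keep, len(run)):
--                     cleanup_log.append((i + off + 1, "(empty line)", "excess_empty_line"))
--         else:
--             result.extend(run)
--         i = j
--     return '\n'.join(result)
-- ===== Notes on version B (the rewrite author's own statement) =====
-- stated objective: alternative
-- what changed: Replaces the per-line loop with a running empty_count by a two-pointer scan over maximal runs of equal emptiness, keeping each empty run's first max_empty lines wholesale.
import Mathlib
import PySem

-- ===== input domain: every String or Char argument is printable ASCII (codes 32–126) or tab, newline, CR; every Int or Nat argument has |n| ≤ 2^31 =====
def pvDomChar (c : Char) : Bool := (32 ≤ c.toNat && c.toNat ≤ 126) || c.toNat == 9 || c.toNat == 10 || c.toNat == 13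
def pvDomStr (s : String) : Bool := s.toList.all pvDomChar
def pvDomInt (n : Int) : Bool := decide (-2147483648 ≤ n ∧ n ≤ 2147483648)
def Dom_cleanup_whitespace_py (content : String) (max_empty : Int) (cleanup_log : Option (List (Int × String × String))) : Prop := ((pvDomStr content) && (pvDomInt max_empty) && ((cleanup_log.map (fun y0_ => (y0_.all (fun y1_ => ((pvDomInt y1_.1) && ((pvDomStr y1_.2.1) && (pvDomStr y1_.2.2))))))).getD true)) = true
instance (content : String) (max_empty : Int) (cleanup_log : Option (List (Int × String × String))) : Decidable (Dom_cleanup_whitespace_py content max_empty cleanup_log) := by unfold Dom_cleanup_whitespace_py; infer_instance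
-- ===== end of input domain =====

-- B rewrites A's per-line empty_count loop as a two-pointer scan over maximal runs of equal
-- emptiness (an 'alternative' decomposition, same cost). Equivalence is about the RETURN value
-- only: both Pythons also append the same tuples to the mutated cleanup_log argument.

-- line.strip() == ''
def pvIsEmptyLine (s : String) : Bool := PySem.Str.strip s == ""

-- ===== PORT A =====
-- A's loop: empty_count state ec; the cleanup_log.append branch does not affect the return
-- value, so the line_num counter n is carried but (like the log) never reaches the result.
def pvALoop (maxe : Int) : List String → Int → Int → List String
  | [], _, _ => []
  | l :: ls, n, ec =>
    if pvIsEmptyLine l then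
      if ec + 1 ≤ maxe then l :: pvALoop maxe ls (n + 1) (ec + 1)
      else pvALoop maxe ls (n + 1) (ec + 1)
    else l :: pvALoop maxe ls (n + 1) 0

-- content.split('\n'): split? is none only for sep = "", so getD [] never fires
def cleanup_whitespace_py (content : String) (max_empty : Int) (cleanup_log : Option (List (Int × String × String))) : String :=
  PySem.Str.join "\n" (pvALoop max_empty ((PySem.Str.split? content "\n").getD []) 1 0)

-- ===== PORT B =====
-- B's while loop: peel the maximal run of lines with the head's emptiness (lines[i:j]);
-- run[:max(max_empty,0)] is run.take maxe.toNat. Index i only feeds the log.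
def pvBLoop (maxe : Int) : List String → Int → List String
  | [], _ => []
  | l :: ls, i =>
    let e := pvIsEmptyLine l
    let run := l :: ls.takeWhile (fun x => pvIsEmptyLine x == e)
    let rest := ls.dropWhile (fun x => pvIsEmptyLine x == e)
    (if e then run.take maxe.toNat else run) ++ pvBLoop maxe rest (i + run.length)
termination_by ls _ => ls.length
decreasing_by simpa using Nat.lt_succ_of_le (List.length_dropWhile_le _ _)

def cleanup_whitespace_py_alt (content : String) (max_empty : Int) (cleanup_log : Option (List (Int × String × String))) : String :=
  PySem.Str.join "\n" (pvBLoop max_empty ((PySem.Str.split? content "\n").getD []) 0)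

-- ===== PRECONDITION & SPEC =====
def Spec_cleanup_whitespace_py (content : String) (max_empty : Int) (cleanup_log : Option (List (Int × String × String))) (out : String) : Prop := out = cleanup_whitespace_py_alt content max_empty cleanup_log
instance (content : String) (max_empty : Int) (cleanup_log : Option (List (Int × String × String))) (out : String) : Decidable (Spec_cleanup_whitespace_py content max_empty cleanup_log out) := by unfold Spec_cleanup_whitespace_py; infer_instance

-- ===== CLAIM (what is proved, stated in full; the proofs are below) =====
def Claim_equal_cleanup_whitespace_py : Prop := ∀ (content : String) (max_empty : Int) (cleanup_log : Option (List (Int × String × String))), Dom_cleanup_whitespace_py content max_empty cleanup_log → Spec_cleanup_whitespace_py content max_empty cleanup_log (cleanup_whitespace_py content max_empty cleanup_log)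

-- ===== LEMMAS AND PROOFS =====

theorem pvALoop_cons (maxe : Int) (l : String) (ls : List String) (n ec : Int) :
    pvALoop maxe (l :: ls) n ec =
      if pvIsEmptyLine l then
        if ec + 1 ≤ maxe then l :: pvALoop maxe ls (n + 1) (ec + 1)
        else pvALoop maxe ls (n + 1) (ec + 1)
      else l :: pvALoop maxe ls (n + 1) 0 := rfl

theorem pvBLoop_cons (maxe : Int) (l : String) (ls : List String) (i : Int) :
    pvBLoop maxe (l :: ls) i =
      (if pvIsEmptyLine l
        then (l :: ls.takeWhile (fun x => pvIsEmptyLine x == pvIsEmptyLine l)).take maxe.toNat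
        else l :: ls.takeWhile (fun x => pvIsEmptyLine x == pvIsEmptyLine l))
      ++ pvBLoop maxe (ls.dropWhile (fun x => pvIsEmptyLine x == pvIsEmptyLine l))
           (i + (l :: ls.takeWhile (fun x => pvIsEmptyLine x == pvIsEmptyLine l)).length) := by
  rw [pvBLoop]

-- A over a run of blank lines: keeps the first (maxe - ec), empty_count grows by the run length.
theorem pvALoop_empty_run (maxe : Int) (run : List String) (h : ∀ x ∈ run, pvIsEmptyLine x = true) :
    ∀ rest n ec, pvALoop maxe (run ++ rest) n ec
      = run.take (maxe - ec).toNat ++ pvALoop maxe rest (n + run.length) (ec + run.length) := by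
  induction run with
  | nil => intro rest n ec; simp
  | cons l ls ih =>
    intro rest n ec
    have hl : pvIsEmptyLine l = true := h l (by simp)
    have hls : ∀ x ∈ ls, pvIsEmptyLine x = true := fun x hx => h x (by simp [hx])
    rw [List.cons_append, pvALoop_cons, if_pos hl]
    by_cases hle : ec + 1 ≤ maxe
    · rw [if_pos hle, ih hls rest (n + 1) (ec + 1)]
      have h1 : (maxe - ec).toNat = (maxe - (ec + 1)).toNat + 1 := by omega
      rw [h1, List.take_succ_cons, List.cons_append, List.length_cons]
      push_cast; ring_nf
    · rw [if_neg hle, ih hls rest (n + 1) (ec + 1)]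
      have h0 : (maxe - ec).toNat = 0 := by omega
      have h0' : (maxe - (ec + 1)).toNat = 0 := by omega
      rw [h0, h0', List.take_zero, List.take_zero, List.nil_append, List.nil_append,
          List.length_cons]
      push_cast; ring_nf
-- A over a nonempty run of non-blank lines: keeps them all, empty_count ends at 0.
theorem pvALoop_nonempty_run (maxe : Int) (l : String) (ls : List String)
    (h : ∀ x ∈ l :: ls, pvIsEmptyLine x = false) :
    ∀ rest n ec, pvALoop maxe ((l :: ls) ++ rest) n ec
      = (l :: ls) ++ pvALoop maxe rest (n + (l :: ls).length) 0 := by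
  induction ls generalizing l with
  | nil =>
    intro rest n ec
    have hl : pvIsEmptyLine l = false := h l (by simp)
    rw [List.cons_append, List.nil_append, pvALoop_cons, if_neg (by simp [hl])]
    simp
  | cons m ms ih =>
    intro rest n ec
    have hl : pvIsEmptyLine l = false := h l (by simp)
    have hms : ∀ x ∈ m :: ms, pvIsEmptyLine x = false := fun x hx => h x (by simp at hx ⊢; tauto)
    rw [List.cons_append, pvALoop_cons, if_neg (by simp [hl]), ih m hms rest (n + 1) 0]
    simp only [List.cons_append, List.length_cons]
    push_cast; ring_nf

-- the empty_count argument is irrelevant when the next line is non-blank (or there is none)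
theorem pvALoop_reset (maxe : Int) (rest : List String)
    (h : ∀ l ls, rest = l :: ls → pvIsEmptyLine l = false) (n ec : Int) :
    pvALoop maxe rest n ec = pvALoop maxe rest n 0 := by
  cases rest with
  | nil => rfl
  | cons l ls =>
    rw [pvALoop_cons, pvALoop_cons, if_neg (by simp [h l ls rfl]), if_neg (by simp [h l ls rfl])]

-- main correspondence: A's loop from empty_count 0 equals B's run scan (line indices are dead)
theorem pvLoop_eq_aux (maxe : Int) : ∀ (k : Nat) (lines : List String), lines.length ≤ k →
    ∀ (n i : Int), pvALoop maxe lines n 0 = pvBLoop maxe lines i := by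
  intro k
  induction k with
  | zero =>
    intro lines hk n i
    rw [List.length_eq_zero_iff.mp (Nat.le_zero.mp hk)]
    rw [show pvALoop maxe [] n 0 = [] from rfl, pvBLoop]
  | succ k ih =>
    intro lines hk n i
    match lines with
    | [] => rw [show pvALoop maxe [] n 0 = [] from rfl, pvBLoop]
    | l :: ls =>
      have hsplit : l :: ls
          = (l :: ls.takeWhile (fun x => pvIsEmptyLine x == pvIsEmptyLine l))
            ++ ls.dropWhile (fun x => pvIsEmptyLine x == pvIsEmptyLine l) := by
        rw [List.cons_append, List.takeWhile_append_dropWhile]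
      have hrestlen : (ls.dropWhile (fun x => pvIsEmptyLine x == pvIsEmptyLine l)).length ≤ k := by
        have := List.length_dropWhile_le (fun x => pvIsEmptyLine x == pvIsEmptyLine l) ls
        simp at hk; omega
      by_cases he : pvIsEmptyLine l = true
      · have hrun : ∀ x ∈ l :: ls.takeWhile (fun x => pvIsEmptyLine x == pvIsEmptyLine l),
            pvIsEmptyLine x = true := by
          intro x hx
          rcases List.mem_cons.mp hx with h | h
          · rw [h, he]
          · have := List.mem_takeWhile_imp h
            simpa [he] using this
        have hrest : ∀ a as,
            ls.dropWhile (fun x => pvIsEmptyLine x == pvIsEmptyLine l) = a :: as →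
            pvIsEmptyLine a = false := by
          intro a as hras
          have h2 := List.head?_dropWhile_not (fun x => pvIsEmptyLine x == pvIsEmptyLine l) ls
          rw [hras] at h2
          simpa [he] using h2
        rw [pvBLoop_cons, if_pos he]
        conv_lhs => rw [hsplit]
        rw [pvALoop_empty_run maxe _ hrun _ n 0, pvALoop_reset maxe _ hrest,
            ih _ hrestlen
              (n + ((l :: ls.takeWhile (fun x => pvIsEmptyLine x == pvIsEmptyLine l)).length : Int))
              (i + ((l :: ls.takeWhile (fun x => pvIsEmptyLine x == pvIsEmptyLine l)).length : Int)),
            sub_zero]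
      · have he' : pvIsEmptyLine l = false := by simpa using he
        have hrun : ∀ x ∈ l :: ls.takeWhile (fun x => pvIsEmptyLine x == pvIsEmptyLine l),
            pvIsEmptyLine x = false := by
          intro x hx
          rcases List.mem_cons.mp hx with h | h
          · rw [h, he']
          · have := List.mem_takeWhile_imp h
            simpa [he'] using this
        rw [pvBLoop_cons, if_neg (by simp [he'])]
        conv_lhs => rw [hsplit]
        rw [pvALoop_nonempty_run maxe l _ hrun _ n 0,
            ih _ hrestlen
              (n + ((l :: ls.takeWhile (fun x => pvIsEmptyLine x == pvIsEmptyLine l)).length : Int))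
              (i + ((l :: ls.takeWhile (fun x => pvIsEmptyLine x == pvIsEmptyLine l)).length : Int))]

-- ===== VERDICT (by name: the statement is the Claim_ definition above) =====
theorem cleanup_whitespace_py_spec : Claim_equal_cleanup_whitespace_py := by
  intro content max_empty cleanup_log _
  unfold Spec_cleanup_whitespace_py cleanup_whitespace_py cleanup_whitespace_py_alt
  rw [pvLoop_eq_aux max_empty ((PySem.Str.split? content "\n").getD []).length _ le_rfl]
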